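-- pv_equiv track=rewrite | github.com/F-Marchal/VCF-comparator | scan.py | group_file_by_name
-- ===== SOURCE A (Python) =====
-- def group_file_by_name(list_of_file: list[str], separator: str = "-") -> dict[str:list[str]]:
--     """Group files inside a dictionary of list using their names.
--     Eg : list_of_file = ["P15-1", "P30-1", "P15-Alpha"] separator="-":
--         -> {"P15": ["P15-1", "P15-Alpha"], "P30": ["P30-1"]}
--
--     :param  list[str] list_of_file: A list of file path / names.
--     :param str separator:           A separator that should be inside each file name
--                                         If the separator isn't inside a name, files will be grouped
--                                             as "SeparatorLessFiles"
--                                         If there isn't any characters before the separator, files will be grouped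
--                                             as "GroupNameLessFiles"
--                                         If separator is inside a name, files will be grouped
--                                             as f"{String before <separator>}"
--     :return dict:   A dictionary with the following form : {"{GroupName}" : ["{FilePath1}", "{FilePath1}", ...]}
--     """
--     groups = {}
--     for file_path in list_of_file:
--         # Remove path
--         file_name = file_path.split("/")[-1]
--         file_name = file_name.split("\\")[-1]
--
--         # remove extension
--         extension_less_name = ".".join(file_name.split(".")[:-1])  # Remove the extension but keep everything else
--
--         split_name = extension_less_name.split(separator)
--         if len(split_name) >= 2:
--             # The splitter has been found, let's try to extract a group name.
--             group_name = split_name[0]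
--             if len(group_name) == 0:
--                 # No group has been found (<file_name> start by <separator>)
--                 group_name = "GroupNameLessFiles"
--         else:
--             # Separator isn't inside <file_name>
--             group_name = "SeparatorLessFiles"
--
--         # Memorize this file
--         if group_name in groups:
--             groups[group_name].append(file_path)
--
--         else:   # A new group is required
--             groups[group_name] = [file_path]
--
--     return groups
-- ===== SOURCE B (Python) =====
-- def _group_name(file_path, separator):
--     file_name = file_path.split("/")[-1]
--     file_name = file_name.split("\\")[-1]
--     extension_less_name = ".".join(file_name.split(".")[:-1])
--     split_name = extension_less_name.split(separator)
--     if len(split_name) >= 2: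
--         return split_name[0] if split_name[0] else "GroupNameLessFiles"
--     return "SeparatorLessFiles"
--
--
-- def group_file_by_name(list_of_file: list[str], separator: str = "-") -> dict:
--     names = [_group_name(f, separator) for f in list_of_file]
--     order = list(dict.fromkeys(names))
--     return {g: [f for n, f in zip(names, list_of_file) if n == g] for g in order}
-- ===== Notes on version B (the rewrite author's own statement) =====
-- stated objective: alternative
-- what changed: Replaced the incremental mutate-a-dict-per-file loop by a two-pass decomposition: first map every file to its group name, then build the dict comprehension over the deduplicated name list, collecting each group's files with a filter.
import Mathlib
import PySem

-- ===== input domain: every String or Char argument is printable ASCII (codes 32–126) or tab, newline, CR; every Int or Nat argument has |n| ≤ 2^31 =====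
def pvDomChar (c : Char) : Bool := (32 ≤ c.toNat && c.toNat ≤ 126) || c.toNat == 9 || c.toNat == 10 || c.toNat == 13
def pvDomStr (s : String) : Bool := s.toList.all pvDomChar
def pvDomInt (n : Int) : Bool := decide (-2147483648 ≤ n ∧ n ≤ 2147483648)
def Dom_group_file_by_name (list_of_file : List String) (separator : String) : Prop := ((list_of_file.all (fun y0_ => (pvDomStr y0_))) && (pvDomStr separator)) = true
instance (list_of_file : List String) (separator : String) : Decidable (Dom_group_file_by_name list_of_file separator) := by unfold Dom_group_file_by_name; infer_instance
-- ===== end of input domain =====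

-- ===== PORT A =====
-- B changes the decomposition only (two passes: name list, then dedup + per-group filter) — same cost class, no speed claim.
-- str.split(sep): exact via PySem.Str.split? for sep ≠ "" (guaranteed by Pre_ for the separator argument; "/", "\\", "." are literal nonempty separators).
def pvSplitOn (s : String) (sep : String) : List String := (PySem.Str.split? s sep).getD [s]

def group_file_by_name (list_of_file : List String) (separator : String) : List (String × List String) :=
  (list_of_file.foldl (fun groups file_path =>
    let file_name := (pvSplitOn file_path "/").getLastD ""
    let file_name := (pvSplitOn file_name "\\").getLastD ""
    let extension_less_name := PySem.Str.join "." ((pvSplitOn file_name ".").dropLast)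
    let split_name := pvSplitOn extension_less_name separator
    let group_name :=
      if split_name.length ≥ 2 then
        let g := split_name.headD ""
        if PySem.Str.len g = 0 then "GroupNameLessFiles" else g
      else "SeparatorLessFiles"
    if groups.contains group_name then
      groups.modify group_name [] (fun l => l ++ [file_path])
    else
      groups.insert group_name [file_path]) PySem.Dict.empty).items

-- ===== PORT B =====
def pvGroupName (file_path : String) (separator : String) : String :=
  let file_name := (pvSplitOn file_path "/").getLastD ""
  let file_name := (pvSplitOn file_name "\\").getLastD ""
  let extension_less_name := PySem.Str.join "." ((pvSplitOn file_name ".").dropLast)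
  let split_name := pvSplitOn extension_less_name separator
  if split_name.length ≥ 2 then
    if PySem.Str.len (split_name.headD "") = 0 then "GroupNameLessFiles" else split_name.headD ""
  else "SeparatorLessFiles"

def group_file_by_name_alt (list_of_file : List String) (separator : String) : List (String × List String) :=
  let names := list_of_file.map (fun f => pvGroupName f separator)
  let order := PySem.List.dedup names
  order.map (fun g => (g, ((names.zip list_of_file).filter (fun p => p.1 == g)).map (fun p => p.2)))

-- ===== PRECONDITION & SPEC =====
-- Pre_ excludes only separator = "" with a nonempty file list, on which Python's str.split raises ValueError (in A and in B alike).
def Pre_group_file_by_name (list_of_file : List String) (separator : String) : Prop := list_of_file ≠ [] → separator ≠ ""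
instance (list_of_file : List String) (separator : String) : Decidable (Pre_group_file_by_name list_of_file separator) := by unfold Pre_group_file_by_name; infer_instance
def pvWitness_group_file_by_name : List String × String := (["P15-1.txt", "P30-1.txt", "P15-Alpha.txt"], "-")

def Spec_group_file_by_name (list_of_file : List String) (separator : String) (out : List (String × List String)) : Prop := out = group_file_by_name_alt list_of_file separator
instance (list_of_file : List String) (separator : String) (out : List (String × List String)) : Decidable (Spec_group_file_by_name list_of_file separator out) := by unfold Spec_group_file_by_name; infer_instance

-- ===== CLAIM (what is proved, stated in full; the proofs are below) =====
def Claim_equal_group_file_by_name : Prop := ∀ (list_of_file : List String) (separator : String), Dom_group_file_by_name list_of_file separator → Pre_group_file_by_name list_of_file separator → Spec_group_file_by_name list_of_file separator (group_file_by_name list_of_file separator)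

-- ===== LEMMAS AND PROOFS =====

-- A's loop body (if-contains-then-modify-else-insert) is the unconditional append-modify.
theorem pv_step_eq_modify {d : PySem.Dict String (List String)} {g : String} {x : String} :
    (if d.contains g then d.modify g [] (fun l => l ++ [x]) else d.insert g [x])
      = d.modify g [] (fun l => l ++ [x]) := by
  by_cases h : d.contains g = true
  · simp [h]
  · simp only [Bool.not_eq_true] at h
    simp [h, PySem.Dict.modify, PySem.Dict.getD,
      (PySem.Dict.get?_eq_none_iff_contains _ _).2 h]

-- A's fold, written with the key function, equals the pair-modify fold.
theorem pv_fold_eq (l : List String) (sep : String) :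
    (l.foldl (fun groups file_path =>
        if groups.contains (pvGroupName file_path sep) then
          groups.modify (pvGroupName file_path sep) [] (fun v => v ++ [file_path])
        else groups.insert (pvGroupName file_path sep) [file_path]) PySem.Dict.empty)
      = ((l.map (fun f => (pvGroupName f sep, f))).foldl
          (fun d p => d.modify p.1 [] (fun v => v ++ [p.2])) PySem.Dict.empty) := by
  rw [List.foldl_map]
  exact PySem.List.foldl_congr_mem l _ _ _ (fun acc x _ => pv_step_eq_modify)

theorem pv_main (l : List String) (sep : String) :
    group_file_by_name l sep = group_file_by_name_alt l sep := by
  show (l.foldl (fun groups file_path =>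
        if groups.contains (pvGroupName file_path sep) then
          groups.modify (pvGroupName file_path sep) [] (fun v => v ++ [file_path])
        else groups.insert (pvGroupName file_path sep) [file_path]) PySem.Dict.empty).items
      = group_file_by_name_alt l sep
  rw [pv_fold_eq]
  set ps := l.map (fun f => (pvGroupName f sep, f)) with hps
  have hd := PySem.Dict.nodup_keys_foldl_modify_key ps Prod.fst ([] : List String)
      (fun d p => fun v => v ++ [p.2]) PySem.Dict.empty PySem.Dict.nodup_keys_empty
  rw [PySem.Dict.items_eq_map_keys _ hd ([] : List String)]
  have hkeys : (ps.foldl (fun d p => d.modify p.1 [] (fun v => v ++ [p.2])) PySem.Dict.empty).keys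
      = PySem.List.dedup (l.map (fun f => pvGroupName f sep)) := by
    rw [PySem.Dict.keys_foldl_modify_key]
    simp [PySem.Dict.keys_empty, PySem.Set.update_nil_left, hps, List.map_map,
      PySem.List.dedup_eq_ofList, Function.comp_def]
  rw [hkeys]
  apply List.map_congr_left
  intro g _
  have hzip : (l.map (fun f => pvGroupName f sep)).zip l = ps := by
    rw [hps]
    have h := @List.zip_map' String String String (fun f => pvGroupName f sep) (fun f => f) l
    simpa using h
  rw [hzip]
  congr 1
  rw [PySem.Dict.getD_foldl_modify_append]
  simp [PySem.Dict.getD_empty]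

-- ===== VERDICT (by name: the statement is the Claim_ definition above) =====
theorem group_file_by_name_spec : Claim_equal_group_file_by_name := by
  intro l sep _ _
  unfold Spec_group_file_by_name
  exact pv_main l sep
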